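-- pv_equiv track=rewrite | github.com/yang4978/Hackerrank | Problem Solving/Algorithms/Implementation/63_ema's_supercomputer.py | twoPluses
-- ===== SOURCE A (Python) =====
-- def twoPluses(grid):
--     rows = len(grid)
--     cols = len(grid[0])
--     result = 0
--     for i in range(rows):
--         for j in range(cols):
--             limit_1 = min(i,rows-1-i,j,cols-1-j)
--             size_1 = 0
--             k = 0
--             while(k<=limit_1):
--                 if( grid[i][j-k]=='G'
--                 and grid[i-k][j]=='G'
--                 and grid[i][j+k]=='G'
--                 and grid[i+k][j]=='G'):
--                     size_1 = 1+4*k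
--                     for m in range(rows):
--                         for n in range(cols):
--                             size_2 = 0
--                             if(m==i and n==j): continue
--                             l = 0
--                             limit_2 = min(m,rows-1-m,n,cols-1-n)
--                             while(l<=limit_2):
--                                 if( grid[m][n-l]=='G'
--                                 and grid[m-l][n]=='G'
--                                 and grid[m][n+l]=='G'
--                                 and grid[m+l][n]=='G'):
--                                     if(m==i and j-k<=n-l<=j+k):break
--                                     if(m==i and j-k<=n+l<=j+k):break
--                                     if(m-l==i and j-k<=n<=j+k):break
--                                     if(m+l==i and j-k<=n<=j+k):break
--                                     if(n-l==j and i-k<=m<=i+k):break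
--                                     if(n+l==j and i-k<=m<=i+k):break
--                                     if(n==j and i-k<=m-l<=i+k):break
--                                     if(n==j and i-k<=m+l<=i+k):break
--                                     size_2 = 1+4*l
--                                     l += 1
--                                 else:
--                                     break
--                             result = max(result,size_1*size_2)
--                     k += 1
--                 else:
--                     break
--
--     return result
-- ===== SOURCE B (Python) =====
-- def twoPluses(grid):
--     rows, cols = len(grid), len(grid[0])
--     # Phase 1: enumerate every valid plus once as (center_i, center_j, arm)
--     pluses = []
--     for i in range(rows):
--         for j in range(cols):
--             lim = min(i, rows - 1 - i, j, cols - 1 - j)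
--             k = 0
--             while (k <= lim and grid[i][j-k] == 'G' and grid[i-k][j] == 'G'
--                    and grid[i][j+k] == 'G' and grid[i+k][j] == 'G'):
--                 pluses.append((i, j, k))
--                 k += 1
--
--     # Phase 2: max product over disjoint pairs, O(1) geometric disjointness
--     def overlap(p, q):
--         i, j, k = p
--         m, n, l = q
--         return ((m == i and abs(n - j) <= k + l)
--                 or (n == j and abs(m - i) <= k + l)
--                 or (abs(m - i) <= l and abs(n - j) <= k)
--                 or (abs(m - i) <= k and abs(n - j) <= l))
--
--     best = 0
--     for idx, p in enumerate(pluses):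
--         for q in pluses[idx+1:]:
--             if not overlap(p, q):
--                 best = max(best, (1 + 4 * p[2]) * (1 + 4 * q[2]))
--     return best
-- ===== Notes on version B (the rewrite author's own statement) =====
-- stated objective: alternative
-- what changed: B enumerates every valid plus (center, arm) once in a single grid pass and then maximizes the area product over pairs of pluses using an O(1) geometric disjointness test, instead of A's re-growing of a second plus cell-by-cell (with incremental overlap break checks) for every center and every arm of every first plus.
import Mathlib
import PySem

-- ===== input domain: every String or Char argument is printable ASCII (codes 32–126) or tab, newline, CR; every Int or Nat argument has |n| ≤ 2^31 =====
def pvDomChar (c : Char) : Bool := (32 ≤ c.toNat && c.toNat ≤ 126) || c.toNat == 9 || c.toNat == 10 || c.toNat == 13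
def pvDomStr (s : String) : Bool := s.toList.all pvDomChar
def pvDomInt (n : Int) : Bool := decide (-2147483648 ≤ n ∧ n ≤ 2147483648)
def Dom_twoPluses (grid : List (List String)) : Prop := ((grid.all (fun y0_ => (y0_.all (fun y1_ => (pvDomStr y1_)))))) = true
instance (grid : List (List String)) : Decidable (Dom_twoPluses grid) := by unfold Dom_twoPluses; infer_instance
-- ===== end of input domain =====

-- B enumerates every valid plus once and takes the max product over pairs of pluses with
-- an O(1) geometric disjointness test, instead of A's re-growing of the second plus (with
-- per-cell grid reads and incremental overlap breaks) for every center and every arm of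
-- the first plus (objective: alternative algorithm; measured cost comparable).

-- ===== PORT A =====
-- grid[i][j]: all reads A performs inside Pre_ use in-range nonnegative indices
-- (0 ≤ i±k < rows, 0 ≤ j±k < cols by the loop bounds), so getD is exact there.
def cellOf (g : List (List String)) (i j : Nat) : String := (g.getD i []).getD j ""

-- min(i, rows-1-i, j, cols-1-j): all Nat subtractions exact for i < rows, j < cols
def limitOf (rows cols i j : Nat) : Nat := min (min i (rows - 1 - i)) (min j (cols - 1 - j))

-- the 4-arm 'G' test A performs at distance k (indices nonneg since k ≤ limit)
def armOk (g : List (List String)) (i j k : Nat) : Bool :=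
  (cellOf g i (j - k) == "G") && (cellOf g (i - k) j == "G") &&
  (cellOf g i (j + k) == "G") && (cellOf g (i + k) j == "G")

-- A's 8 break conditions, in order (Nat subtraction exact: k ≤ min i j, l ≤ min m n inside the loops)
def tipHit (i j k m n l : Nat) : Bool :=
  (m == i && decide (j - k ≤ n - l) && decide (n - l ≤ j + k)) ||
  (m == i && decide (j - k ≤ n + l) && decide (n + l ≤ j + k)) ||
  (m - l == i && decide (j - k ≤ n) && decide (n ≤ j + k)) ||
  (m + l == i && decide (j - k ≤ n) && decide (n ≤ j + k)) ||
  (n - l == j && decide (i - k ≤ m) && decide (m ≤ i + k)) ||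
  (n + l == j && decide (i - k ≤ m) && decide (m ≤ i + k)) ||
  (n == j && decide (i - k ≤ m - l) && decide (m - l ≤ i + k)) ||
  (n == j && decide (i - k ≤ m + l) && decide (m + l ≤ i + k))

-- A's inner 'while(l<=limit_2)' computing size_2 (size carries the last assigned value)
def loopL (g : List (List String)) (i j k m n limit2 l : Nat) (size : Int) : Int :=
  if l ≤ limit2 then
    if armOk g m n l then
      if tipHit i j k m n l then size
      else loopL g i j k m n limit2 (l + 1) (1 + 4 * (l : Int))
    else size
  else size
termination_by limit2 + 1 - l
decreasing_by omega

-- A's 'for m in range(rows): for n in range(cols)' with result = max(result, size_1*size_2)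
def innerMN (g : List (List String)) (rows cols i j k : Nat) (size1 r : Int) : Int :=
  (List.range rows).foldl (fun r m =>
    (List.range cols).foldl (fun r n =>
      if m = i ∧ n = j then r
      else max r (size1 * loopL g i j k m n (limitOf rows cols m n) 0 0)) r) r

-- A's 'while(k<=limit_1)' growing the first plus
def loopK (g : List (List String)) (rows cols i j limit1 k : Nat) (r : Int) : Int :=
  if k ≤ limit1 then
    if armOk g i j k then
      loopK g rows cols i j limit1 (k + 1) (innerMN g rows cols i j k (1 + 4 * (k : Int)) r)
    else r
  else r
termination_by limit1 + 1 - k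
decreasing_by omega

def twoPluses (grid : List (List String)) : Int :=
  let rows := grid.length
  let cols := (grid.headD []).length   -- len(grid[0]); grid ≠ [] inside Pre_
  (List.range rows).foldl (fun r i =>
    (List.range cols).foldl (fun r j =>
      loopK grid rows cols i j (limitOf rows cols i j) 0 r) r) 0

-- ===== PORT B =====
-- abs(a-b) on Python ints; coordinates here are Nats, so (a-b)+(b-a) is exact
def natDist (a b : Nat) : Nat := (a - b) + (b - a)

-- Source B's overlap(p, q): O(1) geometric intersection test of two pluses
def ovB (p q : Nat × Nat × Nat) : Bool :=
  (q.1 == p.1 && decide (natDist q.2.1 p.2.1 ≤ p.2.2 + q.2.2)) ||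
  (q.2.1 == p.2.1 && decide (natDist q.1 p.1 ≤ p.2.2 + q.2.2)) ||
  (decide (natDist q.1 p.1 ≤ q.2.2) && decide (natDist q.2.1 p.2.1 ≤ p.2.2)) ||
  (decide (natDist q.1 p.1 ≤ p.2.2) && decide (natDist q.2.1 p.2.1 ≤ q.2.2))

-- Source B's 'while k <= lim and <4 arms G>: pluses.append((i,j,k)); k += 1'
def growB (g : List (List String)) (i j limit k : Nat) : List (Nat × Nat × Nat) :=
  if k ≤ limit && armOk g i j k then (i, j, k) :: growB g i j limit (k + 1) else []
termination_by limit + 1 - k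
decreasing_by simp_all; omega

-- phase 1: the list of all valid pluses (center_i, center_j, arm)
def plusesOf (g : List (List String)) (rows cols : Nat) : List (Nat × Nat × Nat) :=
  (List.range rows).foldl (fun acc i =>
    (List.range cols).foldl (fun acc j =>
      acc ++ growB g i j (limitOf rows cols i j) 0) acc) []

-- 1 + 4*arm, the area of a plus
def szB (p : Nat × Nat × Nat) : Int := 1 + 4 * (p.2.2 : Int)

-- phase 2: 'for idx, p in enumerate(pluses): for q in pluses[idx+1:]: …' as structural recursion
def bestPairs : List (Nat × Nat × Nat) → Int → Int
  | [], r => r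
  | p :: rest, r =>
      bestPairs rest (rest.foldl (fun r q => if ovB p q then r else max r (szB p * szB q)) r)

def twoPluses_alt (grid : List (List String)) : Int :=
  let rows := grid.length
  let cols := (grid.headD []).length
  bestPairs (plusesOf grid rows cols) 0

-- ===== PRECONDITION & SPEC =====
-- Pre_ excludes exactly the inputs where Python A raises IndexError: the empty grid
-- (grid[0]) and grids with a row shorter than row 0 (grid[i][j] for j < len(grid[0])).
def Pre_twoPluses (grid : List (List String)) : Prop :=
  grid ≠ [] ∧ ∀ row ∈ grid, (grid.headD []).length ≤ row.length
instance (grid : List (List String)) : Decidable (Pre_twoPluses grid) := by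
  unfold Pre_twoPluses; infer_instance

def pvWitness_twoPluses : List (List String) := [["G", "G", "G"], ["G", "G", "G"], ["G", "G", "G"]]

def Spec_twoPluses (grid : List (List String)) (out : Int) : Prop := out = twoPluses_alt grid
instance (grid : List (List String)) (out : Int) : Decidable (Spec_twoPluses grid out) := by
  unfold Spec_twoPluses; infer_instance

-- ===== CLAIM (what is proved, stated in full; the proofs are below) =====
def Claim_equal_twoPluses : Prop := ∀ (grid : List (List String)), Dom_twoPluses grid → Pre_twoPluses grid → Spec_twoPluses grid (twoPluses grid)

-- ===== LEMMAS AND PROOFS =====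

-- generic characterization of a max-accumulating foldl through a body B with term condition T
theorem foldl_body_le_iff {α : Type} (B : α → Int → Int) (T : α → Int → Prop)
    (h : ∀ x r c, B x r ≤ c ↔ r ≤ c ∧ T x c) :
    ∀ (l : List α) (r c : Int), l.foldl (fun r x => B x r) r ≤ c ↔ r ≤ c ∧ ∀ x ∈ l, T x c := by
  intro l
  induction l with
  | nil => simp
  | cons x xs ih =>
      intro r c
      rw [List.foldl_cons, ih, h]
      simp only [List.mem_cons]
      constructor
      · rintro ⟨⟨hr, hx⟩, hxs⟩
        refine ⟨hr, fun y hy => ?_⟩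
        rcases hy with rfl | hy
        · exact hx
        · exact hxs y hy
      · rintro ⟨hr, hall⟩
        exact ⟨⟨hr, hall x (Or.inl rfl)⟩, fun y hy => hall y (Or.inr hy)⟩

-- generic membership of an append-accumulating foldl
theorem foldl_mem_iff {α β : Type} (B : α → List β → List β) (M : α → β → Prop)
    (h : ∀ x init p, p ∈ B x init ↔ p ∈ init ∨ M x p) :
    ∀ (l : List α) (init : List β) (p : β),
      p ∈ l.foldl (fun acc x => B x acc) init ↔ p ∈ init ∨ ∃ x ∈ l, M x p := by
  intro l
  induction l with
  | nil => simp
  | cons x xs ih =>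
      intro init p
      rw [List.foldl_cons, ih, h]
      simp only [List.mem_cons]
      constructor
      · rintro ((hp | hp) | ⟨y, hy, hp⟩)
        · exact Or.inl hp
        · exact Or.inr ⟨x, Or.inl rfl, hp⟩
        · exact Or.inr ⟨y, Or.inr hy, hp⟩
      · rintro (hp | ⟨y, rfl | hy, hp⟩)
        · exact Or.inl (Or.inl hp)
        · exact Or.inl (Or.inr hp)
        · exact Or.inr ⟨y, hy, hp⟩

theorem loopL_ge_size (g : List (List String)) (i j k m n limit2 l : Nat) (s : Int)
    (h : s ≤ 1 + 4 * (l : Int)) : s ≤ loopL g i j k m n limit2 l s := by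
  unfold loopL
  split
  · split
    · split
      · exact le_refl s
      · exact le_trans h (loopL_ge_size g i j k m n limit2 (l + 1) (1 + 4 * (l : Int))
          (by push_cast; omega))
    · exact le_refl s
  · exact le_refl s
termination_by limit2 + 1 - l
decreasing_by omega

theorem loopL_ge (g : List (List String)) (i j k m n limit2 : Nat) :
    ∀ (l L : Nat) (s : Int), l ≤ L → L ≤ limit2 →
      (∀ t, l ≤ t → t ≤ L → armOk g m n t = true ∧ tipHit i j k m n t = false) →
      1 + 4 * (L : Int) ≤ loopL g i j k m n limit2 l s := by
  intro l L s hlL hL hstep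
  have hstepl := hstep l le_rfl hlL
  rw [loopL, if_pos (le_trans hlL hL), hstepl.1, if_pos rfl, hstepl.2]
  simp only [Bool.false_eq_true, if_false]
  rcases Nat.eq_or_lt_of_le hlL with rfl | hlt
  · exact loopL_ge_size g i j k m n limit2 (l + 1) (1 + 4 * (l : Int)) (by push_cast; omega)
  · exact loopL_ge g i j k m n limit2 (l + 1) L (1 + 4 * (l : Int)) hlt hL
      (fun t h1 h2 => hstep t (by omega) h2)
termination_by l L => L - l
decreasing_by omega

theorem loopL_cases (g : List (List String)) (i j k m n limit2 : Nat) :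
    ∀ (l : Nat) (s : Int),
      loopL g i j k m n limit2 l s = s ∨
      ∃ L, l ≤ L ∧ L ≤ limit2 ∧
        (∀ t, l ≤ t → t ≤ L → armOk g m n t = true ∧ tipHit i j k m n t = false) ∧
        loopL g i j k m n limit2 l s = 1 + 4 * (L : Int) := by
  intro l s
  rw [loopL]
  split
  · next hlim =>
    split
    · next harm =>
      split
      · next htip => exact Or.inl rfl
      · next htip =>
        rcases loopL_cases g i j k m n limit2 (l + 1) (1 + 4 * (l : Int)) with heq | ⟨L, h1, h2, h3, h4⟩
        · refine Or.inr ⟨l, le_rfl, hlim, ?_, heq⟩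
          intro t ht1 ht2
          have : t = l := by omega
          subst this
          exact ⟨harm, by simpa using htip⟩
        · refine Or.inr ⟨L, by omega, h2, ?_, h4⟩
          intro t ht1 ht2
          rcases Nat.eq_or_lt_of_le ht1 with rfl | hlt
          · exact ⟨harm, by simpa using htip⟩
          · exact h3 t (by omega) ht2
    · exact Or.inl rfl
  · exact Or.inl rfl
termination_by l => limit2 + 1 - l
decreasing_by omega

-- the term condition contributed by arm k of the plus centred at (i, j)
def ATerm (g : List (List String)) (rows cols i j k : Nat) (c : Int) : Prop :=
  ∀ m < rows, ∀ n < cols, ¬(m = i ∧ n = j) →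
    (1 + 4 * (k : Int)) * loopL g i j k m n (limitOf rows cols m n) 0 0 ≤ c

theorem innerMN_le_iff (g : List (List String)) (rows cols i j k : Nat) (r c : Int) :
    innerMN g rows cols i j k (1 + 4 * (k : Int)) r ≤ c ↔ r ≤ c ∧ ATerm g rows cols i j k c := by
  unfold innerMN ATerm
  rw [foldl_body_le_iff
    (fun m r => (List.range cols).foldl (fun r n =>
      if m = i ∧ n = j then r
      else max r ((1 + 4 * (k : Int)) * loopL g i j k m n (limitOf rows cols m n) 0 0)) r)
    (fun m c => ∀ n < cols, ¬(m = i ∧ n = j) →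
      (1 + 4 * (k : Int)) * loopL g i j k m n (limitOf rows cols m n) 0 0 ≤ c)]
  · simp only [List.mem_range]
  · intro m r' c'
    rw [foldl_body_le_iff
      (fun n r => if m = i ∧ n = j then r
        else max r ((1 + 4 * (k : Int)) * loopL g i j k m n (limitOf rows cols m n) 0 0))
      (fun n c => ¬(m = i ∧ n = j) →
        (1 + 4 * (k : Int)) * loopL g i j k m n (limitOf rows cols m n) 0 0 ≤ c)]
    · simp only [List.mem_range]
    · intro n r'' c''
      by_cases hmn : m = i ∧ n = j
      · simp [hmn]
      · simp only [hmn, if_false, max_le_iff]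
        tauto

theorem loopK_le_iff (g : List (List String)) (rows cols i j limit1 : Nat) :
    ∀ (k : Nat) (r c : Int),
      loopK g rows cols i j limit1 k r ≤ c ↔ r ≤ c ∧
        ∀ k', k ≤ k' → k' ≤ limit1 → (∀ t, k ≤ t → t ≤ k' → armOk g i j t = true) →
          ATerm g rows cols i j k' c := by
  intro k r c
  rw [loopK]
  split
  · next hlim =>
    split
    · next harm =>
      rw [loopK_le_iff g rows cols i j limit1 (k + 1), innerMN_le_iff]
      constructor
      · rintro ⟨⟨hr, hk⟩, hrest⟩
        refine ⟨hr, fun k' h1 h2 h3 => ?_⟩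
        rcases Nat.eq_or_lt_of_le h1 with rfl | hlt
        · exact hk
        · exact hrest k' (by omega) h2 (fun t ht1 ht2 => h3 t (by omega) ht2)
      · rintro ⟨hr, hall⟩
        refine ⟨⟨hr, hall k le_rfl hlim (fun t ht1 ht2 => by
          have : t = k := by omega
          subst this; exact harm)⟩, fun k' h1 h2 h3 => ?_⟩
        refine hall k' (by omega) h2 (fun t ht1 ht2 => ?_)
        rcases Nat.eq_or_lt_of_le ht1 with rfl | hlt
        · exact harm
        · exact h3 t (by omega) ht2
    · next harm =>
      constructor
      · intro hr
        refine ⟨hr, fun k' h1 h2 h3 => absurd (h3 k le_rfl h1) (by simpa using harm)⟩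
      · exact fun h => h.1
  · next hlim =>
    constructor
    · intro hr
      exact ⟨hr, fun k' h1 h2 h3 => absurd (le_trans h1 h2) hlim⟩
    · exact fun h => h.1
termination_by k => limit1 + 1 - k
decreasing_by omega

theorem twoPluses_le_iff (g : List (List String)) (c : Int) :
    twoPluses g ≤ c ↔ 0 ≤ c ∧
      ∀ i < g.length, ∀ j < (g.headD []).length,
        ∀ k, k ≤ limitOf g.length (g.headD []).length i j →
          (∀ t, t ≤ k → armOk g i j t = true) →
          ATerm g g.length (g.headD []).length i j k c := by
  unfold twoPluses
  rw [foldl_body_le_iff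
    (fun i r => (List.range (g.headD []).length).foldl (fun r j =>
      loopK g g.length (g.headD []).length i j (limitOf g.length (g.headD []).length i j) 0 r) r)
    (fun i c => ∀ j < (g.headD []).length,
      ∀ k, k ≤ limitOf g.length (g.headD []).length i j →
        (∀ t, t ≤ k → armOk g i j t = true) →
        ATerm g g.length (g.headD []).length i j k c)]
  · simp only [List.mem_range]
  · intro i r' c'
    rw [foldl_body_le_iff
      (fun j r => loopK g g.length (g.headD []).length i j (limitOf g.length (g.headD []).length i j) 0 r)
      (fun j c => ∀ k, k ≤ limitOf g.length (g.headD []).length i j →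
        (∀ t, t ≤ k → armOk g i j t = true) →
        ATerm g g.length (g.headD []).length i j k c)]
    · simp only [List.mem_range]
    · intro j r'' c''
      rw [loopK_le_iff]
      constructor
      · rintro ⟨hr, hall⟩
        exact ⟨hr, fun k h2 h3 => hall k (Nat.zero_le k) h2 (fun t _ ht2 => h3 t ht2)⟩
      · rintro ⟨hr, hall⟩
        exact ⟨hr, fun k _ h2 h3 => hall k h2 (fun t ht2 => h3 t (Nat.zero_le t) ht2)⟩

theorem growB_mem (g : List (List String)) (i j limit : Nat) :
    ∀ (k : Nat) (p : Nat × Nat × Nat),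
      p ∈ growB g i j limit k ↔
      ∃ k', k ≤ k' ∧ k' ≤ limit ∧ (∀ t, k ≤ t → t ≤ k' → armOk g i j t = true) ∧ p = (i, j, k') := by
  intro k p
  rw [growB]
  split
  · next hc =>
    rw [Bool.and_eq_true, decide_eq_true_eq] at hc
    rw [List.mem_cons, growB_mem g i j limit (k + 1)]
    constructor
    · rintro (rfl | ⟨k', h1, h2, h3, rfl⟩)
      · refine ⟨k, le_rfl, hc.1, fun t ht1 ht2 => ?_, rfl⟩
        have : t = k := by omega
        subst this; exact hc.2
      · refine ⟨k', by omega, h2, fun t ht1 ht2 => ?_, rfl⟩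
        rcases Nat.eq_or_lt_of_le ht1 with rfl | hlt
        · exact hc.2
        · exact h3 t (by omega) ht2
    · rintro ⟨k', h1, h2, h3, rfl⟩
      rcases Nat.eq_or_lt_of_le h1 with rfl | hlt
      · exact Or.inl rfl
      · exact Or.inr ⟨k', by omega, h2, fun t ht1 ht2 => h3 t (by omega) ht2, rfl⟩
  · next hc =>
    rw [Bool.and_eq_true, decide_eq_true_eq] at hc
    simp only [List.not_mem_nil, false_iff]
    rintro ⟨k', h1, h2, h3, rfl⟩
    exact hc ⟨by omega, h3 k le_rfl h1⟩
termination_by k => limit + 1 - k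
decreasing_by simp_all; omega

theorem plusesOf_mem (g : List (List String)) (rows cols : Nat) (p : Nat × Nat × Nat) :
    p ∈ plusesOf g rows cols ↔
      ∃ i < rows, ∃ j < cols, ∃ k', k' ≤ limitOf rows cols i j ∧
        (∀ t, t ≤ k' → armOk g i j t = true) ∧ p = (i, j, k') := by
  unfold plusesOf
  rw [foldl_mem_iff
    (fun i acc => (List.range cols).foldl (fun acc j =>
      acc ++ growB g i j (limitOf rows cols i j) 0) acc)
    (fun i p => ∃ j < cols, ∃ k', k' ≤ limitOf rows cols i j ∧
      (∀ t, t ≤ k' → armOk g i j t = true) ∧ p = (i, j, k'))]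
  · simp only [List.not_mem_nil, false_or, List.mem_range]
  · intro i init q
    rw [foldl_mem_iff
      (fun j acc => acc ++ growB g i j (limitOf rows cols i j) 0)
      (fun j q => q ∈ growB g i j (limitOf rows cols i j) 0)]
    · constructor
      · rintro (hq | ⟨j, hj, hq⟩)
        · exact Or.inl hq
        · rw [growB_mem] at hq
          rcases hq with ⟨k', _, h2, h3, rfl⟩
          exact Or.inr ⟨j, List.mem_range.mp hj, k', h2, fun t ht => h3 t (Nat.zero_le t) ht, rfl⟩
      · rintro (hq | ⟨j, hj, k', h2, h3, rfl⟩)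
        · exact Or.inl hq
        · refine Or.inr ⟨j, List.mem_range.mpr hj, ?_⟩
          rw [growB_mem]
          exact ⟨k', Nat.zero_le k', h2, fun t _ ht => h3 t ht, rfl⟩
    · intro x init' q'
      exact List.mem_append

theorem bestPairs_le_iff :
    ∀ (l : List (Nat × Nat × Nat)) (r c : Int),
      bestPairs l r ≤ c ↔ r ≤ c ∧ l.Pairwise (fun p q => ovB p q = false → szB p * szB q ≤ c) := by
  intro l
  induction l with
  | nil => simp [bestPairs]
  | cons p rest ih =>
      intro r c
      rw [bestPairs, ih, List.pairwise_cons,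
        foldl_body_le_iff
          (fun q r => if ovB p q then r else max r (szB p * szB q))
          (fun q c => ovB p q = false → szB p * szB q ≤ c)]
      · tauto
      · intro q r' c'
        cases hov : ovB p q
        · simp
        · simp

theorem tipHit_iff (i j k m n t : Nat) :
    tipHit i j k m n t = true ↔
      (m = i ∧ j - k ≤ n - t ∧ n - t ≤ j + k) ∨
      (m = i ∧ j - k ≤ n + t ∧ n + t ≤ j + k) ∨
      (m - t = i ∧ j - k ≤ n ∧ n ≤ j + k) ∨
      (m + t = i ∧ j - k ≤ n ∧ n ≤ j + k) ∨
      (n - t = j ∧ i - k ≤ m ∧ m ≤ i + k) ∨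
      (n + t = j ∧ i - k ≤ m ∧ m ≤ i + k) ∨
      (n = j ∧ i - k ≤ m - t ∧ m - t ≤ i + k) ∨
      (n = j ∧ i - k ≤ m + t ∧ m + t ≤ i + k) := by
  simp only [tipHit, Bool.or_eq_true, Bool.and_eq_true, beq_iff_eq, decide_eq_true_eq,
    and_assoc, or_assoc]

theorem ovB_iff (i j k m n l : Nat) :
    ovB (i, j, k) (m, n, l) = true ↔
      (m = i ∧ natDist n j ≤ k + l) ∨ (n = j ∧ natDist m i ≤ k + l) ∨
      (natDist m i ≤ l ∧ natDist n j ≤ k) ∨ (natDist m i ≤ k ∧ natDist n j ≤ l) := by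
  simp only [ovB, Bool.or_eq_true, Bool.and_eq_true, beq_iff_eq, decide_eq_true_eq, or_assoc]

theorem tip_iff (i j k m n l : Nat) (hki : k ≤ i) (hkj : k ≤ j) (hlm : l ≤ m) (hln : l ≤ n) :
    (∃ t, t ≤ l ∧ tipHit i j k m n t = true) ↔ ovB (i, j, k) (m, n, l) = true := by
  rw [ovB_iff]
  simp only [natDist]
  constructor
  · rintro ⟨t, htl, h⟩
    rw [tipHit_iff] at h
    rcases h with ⟨e, h1, h2⟩ | ⟨e, h1, h2⟩ | ⟨e, h1, h2⟩ | ⟨e, h1, h2⟩ |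
      ⟨e, h1, h2⟩ | ⟨e, h1, h2⟩ | ⟨e, h1, h2⟩ | ⟨e, h1, h2⟩
    · exact Or.inl ⟨e, by omega⟩
    · exact Or.inl ⟨e, by omega⟩
    · exact Or.inr (Or.inr (Or.inl ⟨by omega, by omega⟩))
    · exact Or.inr (Or.inr (Or.inl ⟨by omega, by omega⟩))
    · exact Or.inr (Or.inr (Or.inr ⟨by omega, by omega⟩))
    · exact Or.inr (Or.inr (Or.inr ⟨by omega, by omega⟩))
    · exact Or.inr (Or.inl ⟨e, by omega⟩)
    · exact Or.inr (Or.inl ⟨e, by omega⟩)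
  · intro h
    rcases h with ⟨h1, h2⟩ | ⟨h1, h2⟩ | ⟨h1, h2⟩ | ⟨h1, h2⟩
    · refine ⟨(n - j) + (j - n) - k, by omega, ?_⟩
      rw [tipHit_iff]
      rcases Nat.lt_or_ge n (j - k) with hc | hc
      · exact Or.inr (Or.inl ⟨h1, by omega, by omega⟩)
      · exact Or.inl ⟨h1, by omega, by omega⟩
    · refine ⟨(m - i) + (i - m) - k, by omega, ?_⟩
      rw [tipHit_iff]
      rcases Nat.lt_or_ge m (i - k) with hc | hc
      · exact Or.inr (Or.inr (Or.inr (Or.inr (Or.inr (Or.inr (Or.inr ⟨h1, by omega, by omega⟩))))))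
      · exact Or.inr (Or.inr (Or.inr (Or.inr (Or.inr (Or.inr (Or.inl ⟨h1, by omega, by omega⟩))))))
    · refine ⟨(m - i) + (i - m), by omega, ?_⟩
      rw [tipHit_iff]
      rcases Nat.lt_or_ge m i with hc | hc
      · exact Or.inr (Or.inr (Or.inr (Or.inl ⟨by omega, by omega, by omega⟩)))
      · exact Or.inr (Or.inr (Or.inl ⟨by omega, by omega, by omega⟩))
    · refine ⟨(n - j) + (j - n), by omega, ?_⟩
      rw [tipHit_iff]
      rcases Nat.lt_or_ge n j with hc | hc
      · exact Or.inr (Or.inr (Or.inr (Or.inr (Or.inr (Or.inl ⟨by omega, by omega, by omega⟩)))))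
      · exact Or.inr (Or.inr (Or.inr (Or.inr (Or.inl ⟨by omega, by omega, by omega⟩))))

theorem ovB_symm (p q : Nat × Nat × Nat) : ovB p q = ovB q p := by
  rcases p with ⟨i, j, k⟩
  rcases q with ⟨m, n, l⟩
  have h : ovB (i, j, k) (m, n, l) = true ↔ ovB (m, n, l) (i, j, k) = true := by
    rw [ovB_iff, ovB_iff]
    simp only [natDist]
    omega
  rcases hb : ovB (i, j, k) (m, n, l) <;> rcases hb' : ovB (m, n, l) (i, j, k) <;>
    simp_all

theorem ovB_of_same_center (i j k m n l : Nat) (h : m = i ∧ n = j) :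
    ovB (i, j, k) (m, n, l) = true := by
  rw [ovB_iff]
  simp only [natDist]
  omega

-- bounds extraction from limitOf (i < rows, j < cols are not even needed)
theorem limit_le (rows cols i j k : Nat) (h : k ≤ limitOf rows cols i j) : k ≤ i ∧ k ≤ j := by
  unfold limitOf at h
  omega

theorem twoPluses_alt_eq (g : List (List String)) :
    twoPluses_alt g = bestPairs (plusesOf g g.length (g.headD []).length) 0 := rfl

theorem A_le_B (g : List (List String)) : twoPluses g ≤ twoPluses_alt g := by
  have hself : twoPluses_alt g ≤ twoPluses_alt g := le_rfl
  rw [twoPluses_alt_eq, bestPairs_le_iff] at hself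
  obtain ⟨h0, hpw⟩ := hself
  rw [twoPluses_le_iff]
  refine ⟨h0, ?_⟩
  intro i hi j hj k hk harm m hm n hn hne
  rcases loopL_cases g i j k m n (limitOf g.length (g.headD []).length m n) 0 0 with
    heq | ⟨L, _, hL2, hstep, heq⟩
  · rw [heq, mul_zero]; exact h0
  · have hp : ((i, j, k) : Nat × Nat × Nat) ∈ plusesOf g g.length (g.headD []).length := by
      rw [plusesOf_mem]; exact ⟨i, hi, j, hj, k, hk, harm, rfl⟩
    have hq : ((m, n, L) : Nat × Nat × Nat) ∈ plusesOf g g.length (g.headD []).length := by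
      rw [plusesOf_mem]
      exact ⟨m, hm, n, hn, L, hL2, fun t ht => (hstep t (Nat.zero_le t) ht).1, rfl⟩
    have hov : ovB (i, j, k) (m, n, L) = false := by
      by_contra hcon
      rw [Bool.not_eq_false] at hcon
      obtain ⟨hk1, hk2⟩ := limit_le g.length (g.headD []).length i j k hk
      obtain ⟨hl1, hl2⟩ := limit_le g.length (g.headD []).length m n L hL2
      obtain ⟨t, ht, htip⟩ := (tip_iff i j k m n L hk1 hk2 hl1 hl2).mpr hcon
      have := (hstep t (Nat.zero_le t) ht).2
      rw [this] at htip
      exact absurd htip (by simp)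
    have hneq : ((i, j, k) : Nat × Nat × Nat) ≠ (m, n, L) := by
      intro hcon
      apply hne
      have h1 : i = m := congrArg Prod.fst hcon
      have h2 : j = n := congrArg (fun p => p.2.1) hcon
      exact ⟨h1.symm, h2.symm⟩
    have hsymm : Symmetric (fun p q : Nat × Nat × Nat =>
        ovB p q = false → szB p * szB q ≤ twoPluses_alt g) := by
      intro a b hab hov'
      rw [mul_comm]
      exact hab (by rw [ovB_symm]; exact hov')
    have hr := hpw.forall hsymm hp hq hneq hov
    rw [heq]
    simpa [szB] using hr
  
theorem B_le_A (g : List (List String)) : twoPluses_alt g ≤ twoPluses g := by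
  have hself : twoPluses g ≤ twoPluses g := le_rfl
  rw [twoPluses_le_iff] at hself
  obtain ⟨h0, hall⟩ := hself
  rw [twoPluses_alt_eq, bestPairs_le_iff]
  refine ⟨h0, ?_⟩
  apply List.pairwise_of_reflexive_of_forall_ne
  · intro p hov
    exact absurd hov (by
      rcases p with ⟨i, j, k⟩
      rw [Bool.not_eq_false]
      exact ovB_of_same_center i j k i j k ⟨rfl, rfl⟩)
  · intro p hp q hq _
    rw [plusesOf_mem] at hp hq
    obtain ⟨i, hi, j, hj, k, hk, harm, rfl⟩ := hp
    obtain ⟨m, hm, n, hn, l, hl, harm', rfl⟩ := hq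
    intro hov
    have hne : ¬(m = i ∧ n = j) := by
      intro hcon
      rw [ovB_of_same_center i j k m n l hcon] at hov
      exact absurd hov (by simp)
    have hterm := hall i hi j hj k hk harm m hm n hn hne
    obtain ⟨hk1, hk2⟩ := limit_le g.length (g.headD []).length i j k hk
    obtain ⟨hl1, hl2⟩ := limit_le g.length (g.headD []).length m n l hl
    have hnotip : ∀ t, t ≤ l → tipHit i j k m n t = false := by
      intro t ht
      by_contra hcon
      rw [Bool.not_eq_false] at hcon
      have := (tip_iff i j k m n l hk1 hk2 hl1 hl2).mp ⟨t, ht, hcon⟩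
      rw [this] at hov
      exact absurd hov (by simp)
    have hge := loopL_ge g i j k m n (limitOf g.length (g.headD []).length m n) 0 l 0
      (Nat.zero_le l) hl (fun t _ ht2 => ⟨harm' t ht2, hnotip t ht2⟩)
    calc szB (i, j, k) * szB (m, n, l)
        = (1 + 4 * (k : Int)) * (1 + 4 * (l : Int)) := by simp [szB]
      _ ≤ (1 + 4 * (k : Int)) * loopL g i j k m n (limitOf g.length (g.headD []).length m n) 0 0 := by
          apply mul_le_mul_of_nonneg_left hge
          positivity
      _ ≤ twoPluses g := hterm

-- ===== VERDICT (by name: the statement is the Claim_ definition above) =====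
theorem twoPluses_spec : Claim_equal_twoPluses := by
  intro grid _ _
  unfold Spec_twoPluses
  exact le_antisymm (A_le_B grid) (B_le_A grid)
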